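-- pv_equiv track=rewrite | github.com/ark2016/VK-Technopark-project-2024 | data_mining/tests/functions/file_221_240.py | find_product_of_two_odd_not_divisible_by_7
-- ===== SOURCE A (Python) =====
-- def find_product_of_two_odd_not_divisible_by_7(lst):
--     result = []
--     for num in lst:
--         for i in range(1, num // 2 + 1, 2):
--             if num % i == 0 and (num // i) % 2 != 0 and num % 7 != 0:
--                 result.append(num)
--                 break
--     if not result:
--         return None
--     return result
-- ===== SOURCE B (Python) =====
-- def find_product_of_two_odd_not_divisible_by_7(lst):
--     result = [num for num in lst if num >= 3 and num % 2 == 1 and num % 7 != 0]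
--     return result if result else None
-- ===== Notes on version B (the rewrite author's own statement) =====
-- stated objective: faster
-- what changed: Replaced the per-element trial-division scan over range(1, num//2+1, 2) by the equivalent closed-form membership test (num >= 3, odd, not divisible by 7), turning the nested loop into a single filter pass.
import Mathlib
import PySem

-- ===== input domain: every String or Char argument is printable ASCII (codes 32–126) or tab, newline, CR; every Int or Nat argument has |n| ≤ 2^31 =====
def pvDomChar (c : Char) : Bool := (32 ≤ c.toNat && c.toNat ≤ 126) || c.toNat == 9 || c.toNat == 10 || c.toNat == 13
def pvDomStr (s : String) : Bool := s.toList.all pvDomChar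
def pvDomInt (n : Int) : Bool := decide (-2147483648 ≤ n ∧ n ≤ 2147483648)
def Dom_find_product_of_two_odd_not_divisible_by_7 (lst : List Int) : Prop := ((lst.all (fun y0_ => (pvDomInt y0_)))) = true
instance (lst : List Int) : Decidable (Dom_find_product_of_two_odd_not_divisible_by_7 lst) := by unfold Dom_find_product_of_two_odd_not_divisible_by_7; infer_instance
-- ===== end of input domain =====

-- B replaces A's per-element trial-division scan by the equivalent closed-form test
-- (num ≥ 3, odd, not divisible by 7) in a single filter pass (objective: faster).


-- ===== PORT A =====
-- the body of A's inner 'if': num % i == 0 and (num // i) % 2 != 0 and num % 7 != 0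
def pvCondA (num i : Int) : Bool :=
  PySem.Int.mod num i == 0 && !(PySem.Int.mod (PySem.Int.floordiv num i) 2 == 0)
    && !(PySem.Int.mod num 7 == 0)

-- A's inner 'for i in range(1, num//2+1, 2): if …: append; break', ported as the obvious
-- early-exit recursion over the loop counter i (true = the loop appended num and broke).
def pvLoopA (num i stop : Int) : Bool :=
  if i < stop then
    if pvCondA num i then true else pvLoopA num (i + 2) stop
  else false
termination_by (stop - i).toNat
decreasing_by omega

def find_product_of_two_odd_not_divisible_by_7 (lst : List Int) : Option (List Int) :=
  let result := lst.foldl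
    (fun result num =>
      if pvLoopA num 1 (PySem.Int.floordiv num 2 + 1) then result ++ [num] else result) []
  if result = [] then none else some result

-- ===== PORT B =====
def pvKeep (num : Int) : Bool :=
  decide (3 ≤ num) && PySem.Int.mod num 2 == 1 && !(PySem.Int.mod num 7 == 0)

def find_product_of_two_odd_not_divisible_by_7_alt (lst : List Int) : Option (List Int) :=
  let result := lst.filter pvKeep
  if result = [] then none else some result

-- ===== SPEC =====
def Spec_find_product_of_two_odd_not_divisible_by_7 (lst : List Int) (out : Option (List Int)) : Prop := out = find_product_of_two_odd_not_divisible_by_7_alt lst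
instance (lst : List Int) (out : Option (List Int)) : Decidable (Spec_find_product_of_two_odd_not_divisible_by_7 lst out) := by unfold Spec_find_product_of_two_odd_not_divisible_by_7; infer_instance

-- ===== CLAIM (what is proved, stated in full; the proofs are below) =====
def Claim_equal_find_product_of_two_odd_not_divisible_by_7 : Prop := ∀ (lst : List Int), Dom_find_product_of_two_odd_not_divisible_by_7 lst → Spec_find_product_of_two_odd_not_divisible_by_7 lst (find_product_of_two_odd_not_divisible_by_7 lst)

-- ===== LEMMAS AND PROOFS =====

-- A's inner loop returns true iff some counter value i + 2k below stop satisfies the condition.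
lemma pvLoopA_iff (num i stop : Int) :
    pvLoopA num i stop = true ↔
      ∃ x : Int, i ≤ x ∧ x < stop ∧ 2 ∣ x - i ∧ pvCondA num x = true := by
  fun_induction pvLoopA with
  | case1 i hlt hcond =>
    exact ⟨fun _ => ⟨i, le_refl i, hlt, ⟨0, by ring⟩, hcond⟩, fun _ => rfl⟩
  | case2 i hlt hcond ih =>
    rw [ih]
    constructor
    · rintro ⟨x, h1, h2, ⟨k, hk⟩, hc⟩
      exact ⟨x, by omega, h2, ⟨k + 1, by omega⟩, hc⟩
    · rintro ⟨x, h1, h2, ⟨k, hk⟩, hc⟩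
      have hxi : x ≠ i := by
        intro he; rw [he] at hc; rw [hc] at hcond; exact absurd hcond (by simp)
      exact ⟨x, by omega, h2, ⟨k - 1, by omega⟩, hc⟩
  | case3 i hnlt =>
    simp only [Bool.false_eq_true, false_iff]
    rintro ⟨x, h1, h2, _, _⟩
    omega

-- A's inner scan hits iff num ≥ 3, num is odd, and 7 ∤ num.
lemma pvLoopA_eq_pvKeep (num : Int) :
    pvLoopA num 1 (PySem.Int.floordiv num 2 + 1) = pvKeep num := by
  rw [Bool.eq_iff_iff, pvLoopA_iff]
  rw [PySem.Int.floordiv_eq_ediv_of_pos (by norm_num : (0:Int) < 2)]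
  constructor
  · rintro ⟨i, h1, h2, ⟨k, hk⟩, hcond⟩
    have hipos : (0:Int) < i := by omega
    simp only [pvCondA] at hcond
    rw [PySem.Int.mod_eq_emod_of_pos hipos, PySem.Int.floordiv_eq_ediv_of_pos hipos,
        PySem.Int.mod_eq_emod_of_pos (by norm_num : (0:Int) < 2),
        PySem.Int.mod_eq_emod_of_pos (by norm_num : (0:Int) < 7)] at hcond
    simp only [Bool.and_eq_true, beq_iff_eq, Bool.not_eq_true', beq_eq_false_iff_ne, ne_eq] at hcond
    obtain ⟨⟨hdvd, hq⟩, h7⟩ := hcond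
    have hdvd' : i ∣ num := Int.dvd_of_emod_eq_zero hdvd
    have hnum : num = i * (num / i) := (Int.mul_ediv_cancel' hdvd').symm
    have hi2 : i % 2 = 1 := by omega
    have hq2 : (num / i) % 2 = 1 := by omega
    have hodd : num % 2 = 1 := by rw [hnum, Int.mul_emod, hi2, hq2]; norm_num
    have hge : 3 ≤ num := by omega
    simp only [pvKeep, PySem.Int.mod_eq_emod_of_pos (by norm_num : (0:Int) < 2),
      PySem.Int.mod_eq_emod_of_pos (by norm_num : (0:Int) < 7), Bool.and_eq_true,
      decide_eq_true_eq, beq_iff_eq, Bool.not_eq_true', beq_eq_false_iff_ne, ne_eq]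
    exact ⟨⟨hge, hodd⟩, h7⟩
  · intro h
    simp only [pvKeep, PySem.Int.mod_eq_emod_of_pos (by norm_num : (0:Int) < 2),
      PySem.Int.mod_eq_emod_of_pos (by norm_num : (0:Int) < 7), Bool.and_eq_true,
      decide_eq_true_eq, beq_iff_eq, Bool.not_eq_true', beq_eq_false_iff_ne, ne_eq] at h
    obtain ⟨⟨hge, hodd⟩, h7⟩ := h
    refine ⟨1, le_refl 1, by omega, ⟨0, by ring⟩, ?_⟩
    simp only [pvCondA]
    rw [PySem.Int.mod_eq_emod_of_pos (by norm_num : (0:Int) < 1),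
        PySem.Int.floordiv_eq_ediv_of_pos (by norm_num : (0:Int) < 1),
        PySem.Int.mod_eq_emod_of_pos (by norm_num : (0:Int) < 7)]
    simp only [Int.emod_one, Int.ediv_one,
      PySem.Int.mod_eq_emod_of_pos (by norm_num : (0:Int) < 2), hodd]
    simp [h7]

-- ===== VERDICT (by name: the statement is the Claim_ definition above) =====
theorem find_product_of_two_odd_not_divisible_by_7_spec : Claim_equal_find_product_of_two_odd_not_divisible_by_7 := by
  intro lst _
  unfold Spec_find_product_of_two_odd_not_divisible_by_7
    find_product_of_two_odd_not_divisible_by_7 find_product_of_two_odd_not_divisible_by_7_alt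
  have hfold := PySem.List.foldl_append_if
    (fun num => pvLoopA num 1 (PySem.Int.floordiv num 2 + 1)) id lst []
  simp only [id_eq, List.map_id, List.nil_append] at hfold
  have hfe : (fun num => pvLoopA num 1 (PySem.Int.floordiv num 2 + 1)) = pvKeep :=
    funext pvLoopA_eq_pvKeep
  rw [hfe] at hfold
  simp only [hfold]
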